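-- pv_equiv track=rewrite | github.com/trettier/hw | homework.py | ft_reverse_code
-- ===== SOURCE A (Python) =====
-- def ft_straight_code(a):
--     if a < 0:
--         a = -1 * a
--         t = True
--     else:
--         t = False
--     n = 0
--     i = 1
--     while a > 0:
--         b = a % 2
--         a //= 2
--         n += b * i
--         i *= 10
--     if t:
--         n += 10 ** 6
--     return n
--
-- def ft_reverse_code(a):
--     if a < 0:
--         a = -1 * a
--         t = True
--     else:
--         t = False
--     a = ft_straight_code(a)
--     b = 0
--     i = 10
--     a1 = 0
--     while b != 7:
--         if (a // (i ** b)) % 10 == 0: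
--             a1 += 10 ** b
--         b += 1
--     if t:
--         a1 += 10 ** 7
--     return a1
-- ===== SOURCE B (Python) =====
-- def ft_reverse_code(a):
--     t = a < 0
--     if t:
--         a = -a
--     r = sum(10 ** b for b in range(7) if (a // 2 ** b) % 2 == 0)
--     return r + 10 ** 7 if t else r
-- ===== Notes on version B (the rewrite author's own statement) =====
-- stated objective: simpler
-- what changed: B drops A's two-stage build (decimal-coded binary number via ft_straight_code, then a rescan of its decimal digits) and instead tests the seven low binary bits of the absolute value directly, summing the corresponding powers of ten for each zero bit and adding the sign-marker digit at the end.
import Mathlib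
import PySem

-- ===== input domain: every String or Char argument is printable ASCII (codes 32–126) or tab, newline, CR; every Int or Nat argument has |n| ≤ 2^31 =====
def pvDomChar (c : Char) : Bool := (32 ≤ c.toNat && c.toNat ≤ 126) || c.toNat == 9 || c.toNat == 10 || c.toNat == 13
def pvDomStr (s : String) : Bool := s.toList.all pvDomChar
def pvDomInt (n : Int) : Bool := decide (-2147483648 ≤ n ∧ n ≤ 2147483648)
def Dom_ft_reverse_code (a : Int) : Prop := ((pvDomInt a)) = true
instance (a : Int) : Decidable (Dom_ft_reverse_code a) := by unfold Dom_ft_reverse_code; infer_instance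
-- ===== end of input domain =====

-- B replaces A's two-stage build (decimal-coded binary via ft_straight_code, then rescan of its
-- decimal digits) by direct tests of the 7 binary bits of |a|; objective: simpler.

-- ===== PORT A =====
-- while a > 0: b = a % 2; a //= 2; n += b * i; i *= 10
def pvStraightLoop (a n i : Int) : Int :=
  if h : a > 0 then
    pvStraightLoop (PySem.Int.floordiv a 2) (n + PySem.Int.mod a 2 * i) (i * 10)
  else n
termination_by a.toNat
decreasing_by
  have h2 : PySem.Int.floordiv a 2 = a / 2 := PySem.Int.floordiv_eq_ediv_of_pos (by omega)
  rw [h2]; omega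

def ft_straight_code (a : Int) : Int :=
  let p := if a < 0 then (-1 * a, true) else (a, false)
  let n := pvStraightLoop p.1 0 1
  if p.2 then n + 10 ^ 6 else n

-- while b != 7: if (a // (i ** b)) % 10 == 0: a1 += 10 ** b; b += 1
-- (i is the constant 10; fuel 8 covers the exactly 7 iterations the loop performs from b = 0)
def pvRevLoop (fuel : Nat) (a b a1 : Int) : Int :=
  match fuel with
  | 0 => a1
  | f + 1 =>
    if b ≠ 7 then
      pvRevLoop f a (b + 1)
        (if PySem.Int.mod (PySem.Int.floordiv a (10 ^ b.toNat)) 10 = 0 then a1 + 10 ^ b.toNat else a1)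
    else a1

def ft_reverse_code (a : Int) : Int :=
  let p := if a < 0 then (-1 * a, true) else (a, false)
  let a2 := ft_straight_code p.1
  let a1 := pvRevLoop 8 a2 0 0
  if p.2 then a1 + 10 ^ 7 else a1

-- ===== PORT B =====
def ft_reverse_code_alt (a : Int) : Int :=
  let t := decide (a < 0)
  let a' := if t then -a else a
  let r := (((PySem.List.pyRange 0 7 1).filter
      (fun b => PySem.Int.mod (PySem.Int.floordiv a' (2 ^ b.toNat)) 2 == 0)).map
    (fun b => (10 : Int) ^ b.toNat)).sum
  if t then r + 10 ^ 7 else r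

-- ===== PRECONDITION & SPEC =====
def Spec_ft_reverse_code (a : Int) (out : Int) : Prop := out = ft_reverse_code_alt a
instance (a : Int) (out : Int) : Decidable (Spec_ft_reverse_code a out) := by unfold Spec_ft_reverse_code; infer_instance

-- ===== CLAIM (what is proved, stated in full; the proofs are below) =====
def Claim_equal_ft_reverse_code : Prop := ∀ (a : Int), Dom_ft_reverse_code a → Spec_ft_reverse_code a (ft_reverse_code a)

-- ===== LEMMAS AND PROOFS =====

-- the straight code of m: binary digits of m written as decimal digits
def pvS (m : Nat) : Nat :=
  if m = 0 then 0 else m % 2 + 10 * pvS (m / 2)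
termination_by m
decreasing_by omega

lemma pvS_mod10 (m : Nat) : pvS m % 10 = m % 2 := by
  by_cases h : m = 0
  · simp [h, pvS]
  · rw [pvS, if_neg h]; omega

lemma pvS_div10 (m : Nat) : pvS m / 10 = pvS (m / 2) := by
  by_cases h : m = 0
  · simp [h, pvS]
  · rw [pvS, if_neg h]; omega

-- decimal digit b of pvS m is binary digit b of m
lemma pvS_digit (b : Nat) : ∀ m : Nat, (pvS m / 10 ^ b) % 10 = (m / 2 ^ b) % 2 := by
  induction b with
  | zero => intro m; simpa using pvS_mod10 m
  | succ b ih =>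
    intro m
    have h1 : pvS m / 10 ^ (b + 1) = pvS m / 10 / 10 ^ b := by
      rw [Nat.div_div_eq_div_mul, pow_succ']
    have h2 : m / 2 ^ (b + 1) = m / 2 / 2 ^ b := by
      rw [Nat.div_div_eq_div_mul, pow_succ']
    rw [h1, h2, pvS_div10, ih]

lemma digit_int (m b : Nat) :
    PySem.Int.mod (PySem.Int.floordiv ((pvS m : Int)) ((10 : Int) ^ b)) 10 =
      PySem.Int.mod (PySem.Int.floordiv ((m : Int)) ((2 : Int) ^ b)) 2 := by
  rw [show ((10 : Int) ^ b) = (((10 ^ b : Nat)) : Int) from by push_cast; ring,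
    show ((2 : Int) ^ b) = (((2 ^ b : Nat)) : Int) from by push_cast; ring,
    PySem.Int.floordiv_natCast, PySem.Int.floordiv_natCast,
    show ((10 : Int)) = ((10 : Nat) : Int) from rfl, show ((2 : Int)) = ((2 : Nat) : Int) from rfl,
    PySem.Int.mod_natCast, PySem.Int.mod_natCast]
  exact_mod_cast pvS_digit b m

lemma straightLoop_eq (m : Nat) : ∀ n i : Int, pvStraightLoop (↑m) n i = n + i * (pvS m : Int) := by
  induction m using Nat.strong_induction_on with
  | _ m ih =>
    intro n i
    rw [pvStraightLoop]
    by_cases h : (m : Int) > 0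
    · have hm : m ≠ 0 := by exact_mod_cast h.ne'
      rw [dif_pos h]
      have hf : PySem.Int.floordiv (↑m) 2 = ((m / 2 : Nat) : Int) := by
        exact_mod_cast PySem.Int.floordiv_natCast m 2
      have hmod : PySem.Int.mod (↑m) 2 = ((m % 2 : Nat) : Int) := by
        exact_mod_cast PySem.Int.mod_natCast m 2
      rw [hf, hmod, ih (m / 2) (by omega),
        show pvS m = m % 2 + 10 * pvS (m / 2) from by rw [pvS, if_neg hm]]
      push_cast; ring
    · have hm : m = 0 := by omega
      rw [dif_neg h]; simp [hm, pvS]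

lemma straight_eq (m : Nat) : ft_straight_code (↑m) = (pvS m : Int) := by
  unfold ft_straight_code
  rw [if_neg (by omega : ¬ ((m : Int) < 0))]
  simp [straightLoop_eq m 0 1]

lemma sum_map_filter {α : Type} (p : α → Bool) (f : α → Int) :
    ∀ l : List α, ((l.filter p).map f).sum = (l.map (fun b => if p b then f b else 0)).sum := by
  intro l
  induction l with
  | nil => rfl
  | cons x xs ih => by_cases h : p x <;> simp [h, ih]

-- A's scan loop, characterised as a sum over the remaining digit positions
lemma revLoop_eq (s : Int) :
    ∀ k j : Nat, j + k = 7 → ∀ a1 : Int,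
      pvRevLoop (k + 1) s (j : Int) a1 =
        a1 + (((List.range 7).drop j).map
          (fun b => if PySem.Int.mod (PySem.Int.floordiv s (10 ^ b)) 10 = 0 then (10 : Int) ^ b else 0)).sum := by
  intro k
  induction k with
  | zero =>
    intro j hj a1
    have h7 : j = 7 := by omega
    subst h7
    rw [pvRevLoop, if_neg (by norm_num), show (List.range 7).drop 7 = [] from rfl]
    simp
  | succ k ih =>
    intro j hj a1
    have hj7 : j < 7 := by omega
    rw [pvRevLoop, if_pos (by exact_mod_cast (by omega : j ≠ 7)),
      show ((j : Int) + 1) = ((j + 1 : Nat) : Int) by push_cast; ring,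
      ih (j + 1) (by omega), Int.toNat_natCast,
      show ((List.range 7).drop j) = j :: (List.range 7).drop (j + 1) from by
        rw [List.drop_eq_getElem_cons (by simpa using hj7), List.getElem_range]]
    by_cases h : PySem.Int.mod (PySem.Int.floordiv s (10 ^ j)) 10 = 0
    · rw [if_pos h, List.map_cons, List.sum_cons, if_pos h]; ring
    · rw [if_neg h, List.map_cons, List.sum_cons, if_neg h]; ring

lemma core (m : Nat) :
    pvRevLoop 8 ((pvS m : Int)) 0 0 =
      (((PySem.List.pyRange 0 7 1).filter
          (fun b => PySem.Int.mod (PySem.Int.floordiv ((m : Int)) (2 ^ b.toNat)) 2 == 0)).map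
        (fun b => (10 : Int) ^ b.toNat)).sum := by
  have hA := revLoop_eq ((pvS m : Int)) 7 0 rfl 0
  rw [show ((0 : Nat) : Int) = 0 from rfl] at hA
  rw [hA, List.drop_zero, zero_add]
  rw [show (7 : Int) = ((7 : Nat) : Int) from rfl, PySem.List.pyRange_zero_natCast,
    List.filter_map, List.map_map, sum_map_filter]
  congr 1
  apply List.map_congr_left
  intro b _
  simp only [Function.comp, Int.toNat_natCast, beq_iff_eq, digit_int]
theorem ft_reverse_code_spec : Claim_equal_ft_reverse_code := by
  intro a _
  unfold Spec_ft_reverse_code ft_reverse_code ft_reverse_code_alt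
  by_cases ha : a < 0
  · have hm : -a = ((((-a).toNat) : Nat) : Int) := by omega
    simp only [ha, decide_true, if_true]
    rw [show -1 * a = -a from by ring, hm, straight_eq, core]
  · have hm : a = (((a.toNat) : Nat) : Int) := by omega
    simp only [ha, decide_false, Bool.false_eq_true, if_false]
    rw [hm, straight_eq, core]
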